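-- pv_equiv track=rewrite | github.com/Arthur-Dauphole/Projet-BRAIN | Arthur_2/BRAIN_PROJECT/modules/transformation_detector.py | _rotate_pixels
-- ===== SOURCE A (Python) =====
-- def _rotate_pixels(pixels: set, height: int, width: int, angle: int) -> set:
--     """Rotate a set of pixels by the given angle."""
--     rotated = set()
--
--     for r, c in pixels:
--         if angle == 90:
--             new_r, new_c = c, height - 1 - r
--         elif angle == 180:
--             new_r, new_c = height - 1 - r, width - 1 - c
--         elif angle == 270:
--             new_r, new_c = width - 1 - c, r
--         else:
--             new_r, new_c = r, c
--         rotated.add((new_r, new_c))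
--
--     return rotated
-- ===== SOURCE B (Python) =====
-- def _rotate_pixels(pixels: set, height: int, width: int, angle: int) -> set:
--     """Rotate a set of pixels by composing quarter-turns."""
--     def rotate90(pts, h, w):
--         return {(c, h - 1 - r) for r, c in pts}, w, h
--
--     k = {90: 1, 180: 2, 270: 3}.get(angle, 0)
--     cur, h, w = set(pixels), height, width
--     for _ in range(k):
--         cur, h, w = rotate90(cur, h, w)
--     return cur
-- ===== Notes on version B (the rewrite author's own statement) =====
-- stated objective: alternative
-- what changed: Instead of a four-way branch on the angle applied per pixel, B defines a single 90-degree quarter-turn step (with dimension swap) and applies it k = angle/90 times (k = 0 for angles outside {90,180,270}).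
import Mathlib
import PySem

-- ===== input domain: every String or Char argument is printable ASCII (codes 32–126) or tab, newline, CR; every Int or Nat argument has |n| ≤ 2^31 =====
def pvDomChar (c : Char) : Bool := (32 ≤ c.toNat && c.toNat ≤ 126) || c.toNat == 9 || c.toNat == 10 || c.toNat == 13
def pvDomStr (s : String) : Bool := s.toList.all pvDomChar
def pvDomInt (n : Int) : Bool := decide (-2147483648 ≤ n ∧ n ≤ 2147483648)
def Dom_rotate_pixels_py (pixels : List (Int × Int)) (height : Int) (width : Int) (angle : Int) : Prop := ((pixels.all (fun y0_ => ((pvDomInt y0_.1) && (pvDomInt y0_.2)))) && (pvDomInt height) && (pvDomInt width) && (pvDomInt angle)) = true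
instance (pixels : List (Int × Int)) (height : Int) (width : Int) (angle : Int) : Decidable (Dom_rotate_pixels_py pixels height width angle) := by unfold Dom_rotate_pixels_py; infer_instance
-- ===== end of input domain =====

-- B composes the total rotation from repeated 90° quarter-turn steps (swapping the dims each
-- step) instead of A's per-pixel four-way branch on the angle; same cost, different decomposition.

-- ===== PORT A =====
-- literal transliteration of A: one pass over pixels, branching on the angle per pixel,
-- adding each mapped pair to a fresh set.
def rotate_pixels_py (pixels : List (Int × Int)) (height : Int) (width : Int) (angle : Int) : List (Int × Int) :=
  pixels.foldl (fun rotated p =>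
    PySem.Set.add rotated
      (if angle = 90 then (p.2, height - 1 - p.1)
       else if angle = 180 then (height - 1 - p.1, width - 1 - p.2)
       else if angle = 270 then (width - 1 - p.2, p.1)
       else (p.1, p.2)))
    PySem.Set.empty

-- ===== PORT B =====
-- rotate90: the set comprehension {(c, h-1-r) for (r,c) in pts} (dims swap handled at the call site)
def pvRot90 (pts : List (Int × Int)) (h : Int) : List (Int × Int) :=
  PySem.Set.ofList (pts.map (fun p => (p.2, h - 1 - p.1)))

-- the 'for _ in range(k)' loop threading (cur, h, w)
def pvGo : Nat → List (Int × Int) → Int → Int → List (Int × Int)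
  | 0, cur, _, _ => cur
  | Nat.succ n, cur, h, w => pvGo n (pvRot90 cur h) w h

def rotate_pixels_py_alt (pixels : List (Int × Int)) (height : Int) (width : Int) (angle : Int) : List (Int × Int) :=
  let k : Nat := if angle = 90 then 1 else if angle = 180 then 2 else if angle = 270 then 3 else 0
  pvGo k (PySem.Set.ofList pixels) height width

-- ===== PRECONDITION & SPEC =====
def Spec_rotate_pixels_py (pixels : List (Int × Int)) (height : Int) (width : Int) (angle : Int) (out : List (Int × Int)) : Prop := out = rotate_pixels_py_alt pixels height width angle
instance (pixels : List (Int × Int)) (height : Int) (width : Int) (angle : Int) (out : List (Int × Int)) : Decidable (Spec_rotate_pixels_py pixels height width angle out) := by unfold Spec_rotate_pixels_py; infer_instance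

-- ===== CLAIM (what is proved, stated in full; the proofs are below) =====
def Claim_equal_rotate_pixels_py : Prop := ∀ (pixels : List (Int × Int)) (height : Int) (width : Int) (angle : Int), Dom_rotate_pixels_py pixels height width angle → Spec_rotate_pixels_py pixels height width angle (rotate_pixels_py pixels height width angle)

-- ===== LEMMAS AND PROOFS =====

-- set(map f l) = map f (set(l)) for injective f
theorem ofList_map_of_injective (f : Int × Int → Int × Int) (hf : Function.Injective f)
    (l : List (Int × Int)) :
    PySem.Set.ofList (l.map f) = (PySem.Set.ofList l).map f := by
  induction l using List.reverseRecOn with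
  | nil => simp [PySem.Set.ofList_nil]
  | append_singleton l x ih =>
    rw [List.map_append, List.map_singleton, PySem.Set.ofList_append_singleton,
        PySem.Set.ofList_append_singleton, ih]
    by_cases hx : x ∈ PySem.Set.ofList l
    · have h2 : f x ∈ (PySem.Set.ofList l).map f := List.mem_map_of_mem hx
      simp [PySem.Set.add, hx, h2]
    · have h2 : f x ∉ (PySem.Set.ofList l).map f := fun hm =>
        hx ((List.mem_map_of_injective hf).mp hm)
      simp [PySem.Set.add, hx, h2]

theorem ofList_map_self (f : Int × Int → Int × Int) (hf : Function.Injective f)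
    (s : List (Int × Int)) (hs : s.Nodup) :
    PySem.Set.ofList (s.map f) = s.map f :=
  PySem.Set.ofList_eq_self_of_nodup _ (hs.map hf)

-- A's loop is set(map f pixels)
theorem foldl_add_eq_ofList_map (f : Int × Int → Int × Int) (l : List (Int × Int)) :
    l.foldl (fun s p => PySem.Set.add s (f p)) PySem.Set.empty
      = PySem.Set.ofList (l.map f) := by
  rw [← PySem.Set.update_map_eq_foldl_add]
  exact PySem.Set.update_nil_left _

theorem rot90_injective (h : Int) :
    Function.Injective (fun p : Int × Int => (p.2, h - 1 - p.1)) := by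
  intro a b hab
  simp only [Prod.mk.injEq] at hab
  exact Prod.ext (by omega) hab.1

-- ===== VERDICT (by name: the statement is the Claim_ definition above) =====
theorem rotate_pixels_py_spec : Claim_equal_rotate_pixels_py := by
  intro pixels height width angle _
  unfold Spec_rotate_pixels_py rotate_pixels_py rotate_pixels_py_alt
  rw [foldl_add_eq_ofList_map]
  have hnd := PySem.Set.nodup_ofList (xs := pixels)
  have h1 := rot90_injective height
  have h2 := rot90_injective width
  by_cases h90 : angle = 90
  · subst h90
    simp only [reduceIte, pvGo, pvRot90]
    rw [ofList_map_of_injective _ h1, ofList_map_self _ h1 _ hnd]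
  · by_cases h180 : angle = 180
    · subst h180
      simp only [h90, reduceIte, pvGo, pvRot90]
      rw [ofList_map_of_injective _ (fun a b hab => by
            simp only [Prod.mk.injEq] at hab
            exact Prod.ext (by omega) (by omega)),
          ofList_map_self _ h1 _ hnd,
          ofList_map_self _ h2 _ (hnd.map h1),
          List.map_map]
      apply List.map_congr_left
      intro p _
      simp [Function.comp]
    · by_cases h270 : angle = 270
      · subst h270
        simp only [reduceIte, pvGo, pvRot90,
          if_neg (by norm_num : ¬((270:Int) = 90)), if_neg (by norm_num : ¬((270:Int) = 180))]
        rw [ofList_map_of_injective _ (fun a b hab => by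
              simp only [Prod.mk.injEq] at hab
              exact Prod.ext hab.2 (by omega)),
            ofList_map_self _ h1 _ hnd,
            ofList_map_self _ h2 _ (hnd.map h1),
            ofList_map_self _ h1 _ ((hnd.map h1).map h2),
            List.map_map, List.map_map]
        apply List.map_congr_left
        intro p _
        simp only [Function.comp]
        exact Prod.ext rfl (by omega)
      · simp only [h90, h180, h270, reduceIte, pvGo]
        simp
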